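-- pv_equiv track=rewrite | github.com/Benjamin-VRB/IN200_Sudoku | Grille/Archive.py | valider_masque_kakuro
-- ===== SOURCE A (Python) =====
-- def trouver_groupes_horizontaux_kakuro(grille : list[list:int]):
--     groupes = []
--     dimension = len(grille)
--     for ligne in range(dimension):
--         groupe = []
--         for colonne in range(dimension):
--             if grille[ligne][colonne] == 0:
--                 groupe.append((ligne, colonne))
--             else:
--                 if len(groupe) >= 2:
--                     groupes.append(groupe)
--                 groupe = []
--         if len(groupe) >= 2:
--             groupes.append(groupe)
--     return groupes
--
-- def trouver_groupes_verticaux_kakuro(grille: list[list:int]):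
--     groupes = []
--     dimension = len(grille)
--     for colonne in range(dimension):
--         groupe = []
--         for ligne in range(dimension):
--             if grille[ligne][colonne] == 0:
--                 groupe.append((ligne, colonne))
--             else:
--                 if len(groupe) >= 2:
--                     groupes.append(groupe)
--                 groupe = []
--         if len(groupe) >= 2:
--             groupes.append(groupe)
--     return groupes
--
-- def valider_masque_kakuro(grille : list[list:int]):
--     dimension = len(grille)
--     groupes_h = trouver_groupes_horizontaux_kakuro(grille)
--     groupes_v = trouver_groupes_verticaux_kakuro(grille)
--
--     # Vérifier tailles des groupes
--     for g in groupes_h + groupes_v: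
--         if len(g) < 2 or len(g) > 9:
--             return False
--
--     # Vérifier que chaque case blanche appartient à 2 groupes
--     compteur = [[0]*dimension for _ in range(dimension)]
--     for g in groupes_h + groupes_v:
--         for (i,j) in g:
--             compteur[i][j] += 1
--     for i in range(dimension):
--         for j in range(dimension):
--             if grille[i][j] == 0 and compteur[i][j] != 2:
--                 return False
--     return True
-- ===== SOURCE B (Python) =====
-- def valider_masque_kakuro(grille):
--     n = len(grille)
--
--     def ligne_ok(cases):
--         run = 0
--         for v in cases:
--             if v == 0:
--                 run += 1
--             elif run == 1 or run > 9:
--                 return False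
--             else:
--                 run = 0
--         return run != 1 and run <= 9
--
--     return all(ligne_ok(grille[i][:n]) for i in range(n)) and \
--            all(ligne_ok([grille[i][j] for i in range(n)]) for j in range(n))
-- ===== Notes on version B (the rewrite author's own statement) =====
-- stated objective: simpler
-- what changed: Replaced the two group-coordinate-list builders plus the counter grid and three validation passes by one run-length scanner applied to each row and each column of the n-by-n square: a white cell is valid iff its horizontal and vertical zero-runs both have length 2..9, i.e. no row or column contains a maximal zero-run of length 1 or >9.
import Mathlib
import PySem

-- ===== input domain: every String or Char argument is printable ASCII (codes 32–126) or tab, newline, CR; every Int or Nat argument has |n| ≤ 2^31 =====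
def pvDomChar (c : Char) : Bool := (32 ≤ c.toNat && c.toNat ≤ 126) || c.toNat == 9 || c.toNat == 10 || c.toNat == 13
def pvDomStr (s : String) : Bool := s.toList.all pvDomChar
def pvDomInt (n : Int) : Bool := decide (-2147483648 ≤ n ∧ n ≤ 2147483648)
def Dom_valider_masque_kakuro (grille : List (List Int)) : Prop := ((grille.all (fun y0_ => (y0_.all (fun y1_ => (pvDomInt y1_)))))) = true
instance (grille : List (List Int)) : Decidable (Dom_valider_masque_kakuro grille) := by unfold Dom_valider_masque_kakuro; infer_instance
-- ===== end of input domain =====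

-- B replaces A's group-coordinate lists + counter grid by one run-length scan of each row
-- and column (objective: simpler). Equivalence of the RETURN value on grids where A raises
-- no IndexError (Pre_ below); Python lists are not mutated by either version.

-- ===== PORT A =====
-- literal port; grid cells are read as grille[ligne][colonne] (indices are range values,
-- so nonnegative; the getD defaults are never reached under Pre_).
def trouver_groupes_horizontaux_kakuro (grille : List (List Int)) : List (List (Nat × Nat)) :=
  let dimension := grille.length
  (List.range dimension).foldl (fun groupes ligne =>
    let st := (List.range dimension).foldl
      (fun (st : List (List (Nat × Nat)) × List (Nat × Nat)) colonne =>
        if (grille.getD ligne []).getD colonne 1 = 0 then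
          (st.1, st.2 ++ [(ligne, colonne)])
        else
          (if 2 ≤ st.2.length then st.1 ++ [st.2] else st.1, []))
      (groupes, [])
    if 2 ≤ st.2.length then st.1 ++ [st.2] else st.1) []

def trouver_groupes_verticaux_kakuro (grille : List (List Int)) : List (List (Nat × Nat)) :=
  let dimension := grille.length
  (List.range dimension).foldl (fun groupes colonne =>
    let st := (List.range dimension).foldl
      (fun (st : List (List (Nat × Nat)) × List (Nat × Nat)) ligne =>
        if (grille.getD ligne []).getD colonne 1 = 0 then
          (st.1, st.2 ++ [(ligne, colonne)])
        else
          (if 2 ≤ st.2.length then st.1 ++ [st.2] else st.1, []))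
      (groupes, [])
    if 2 ≤ st.2.length then st.1 ++ [st.2] else st.1) []

def valider_masque_kakuro (grille : List (List Int)) : Bool :=
  let dimension := grille.length
  let groupes_h := trouver_groupes_horizontaux_kakuro grille
  let groupes_v := trouver_groupes_verticaux_kakuro grille
  -- 'for g in …: if …: return False' = early-false scan
  if (groupes_h ++ groupes_v).any (fun g => g.length < 2 || 9 < g.length) then false
  else
    let compteur : List (List Int) := List.replicate dimension (List.replicate dimension 0)
    let compteur := (groupes_h ++ groupes_v).foldl
      (fun c g => g.foldl (fun c p => c.modify p.1 (fun row => row.modify p.2 (· + 1))) c)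
      compteur
    !((List.range dimension).any fun i => (List.range dimension).any fun j =>
        (grille.getD i []).getD j 1 == 0 && !((compteur.getD i []).getD j 0 == 2))

-- ===== PORT B =====
-- run-length scanner: False as soon as a finished zero-run has length 1 or > 9
def vmkLigneOk (run : Nat) (cases : List Int) : Bool :=
  match cases with
  | [] => !(run == 1) && decide (run ≤ 9)
  | v :: t =>
    if v = 0 then vmkLigneOk (run + 1) t
    else if run == 1 || decide (9 < run) then false
    else vmkLigneOk 0 t

def valider_masque_kakuro_alt (grille : List (List Int)) : Bool :=
  let n := grille.length
  ((List.range n).all fun i => vmkLigneOk 0 ((grille.getD i []).take n)) &&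
  ((List.range n).all fun j => vmkLigneOk 0 ((List.range n).map fun i => (grille.getD i []).getD j 1))

-- ===== PRECONDITION & SPEC =====
-- Pre_ excludes exactly the ragged grids (some of the first n = len(grille) rows shorter
-- than n), on which A raises IndexError; on every other input A returns.
def Pre_valider_masque_kakuro (grille : List (List Int)) : Prop :=
  ∀ row ∈ grille, grille.length ≤ row.length
instance (grille : List (List Int)) : Decidable (Pre_valider_masque_kakuro grille) := by
  unfold Pre_valider_masque_kakuro; infer_instance

def pvWitness_valider_masque_kakuro : List (List Int) := [[0, 0], [0, 0]]

def Spec_valider_masque_kakuro (grille : List (List Int)) (out : Bool) : Prop :=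
  out = valider_masque_kakuro_alt grille
instance (grille : List (List Int)) (out : Bool) : Decidable (Spec_valider_masque_kakuro grille out) := by
  unfold Spec_valider_masque_kakuro; infer_instance

-- ===== CLAIM (what is proved, stated in full; the proofs are below) =====
def Claim_equal_valider_masque_kakuro : Prop :=
  ∀ (grille : List (List Int)), Dom_valider_masque_kakuro grille →
    Pre_valider_masque_kakuro grille →
    Spec_valider_masque_kakuro grille (valider_masque_kakuro grille)

-- ===== LEMMAS AND PROOFS =====

-- maximal zero-runs (as position lists) of a line, with current partial run g starting
-- before position k; only runs of length ≥ 2 are kept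
def vmkRuns (ℓ : List Int) (k : Nat) (g : List Nat) : List (List Nat) :=
  match ℓ with
  | [] => if 2 ≤ g.length then [g] else []
  | v :: t =>
    if v = 0 then vmkRuns t (k + 1) (g ++ [k])
    else (if 2 ≤ g.length then [g] else []) ++ vmkRuns t (k + 1) []

def vmkLrow (grille : List (List Int)) (i : Nat) : List Int :=
  (grille.getD i []).take grille.length

def vmkLcol (grille : List (List Int)) (j : Nat) : List Int :=
  (List.range grille.length).map fun i => (grille.getD i []).getD j 1

def vmkCell (grille : List (List Int)) (i j : Nat) : Int := (grille.getD i []).getD j 1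

def vmkIncr (c : List (List Int)) (p : Nat × Nat) : List (List Int) :=
  c.modify p.1 (fun row => row.modify p.2 (· + 1))

def vmkLook (c : List (List Int)) (i j : Nat) : Int := (c.getD i []).getD j 0

def vmkShape (c : List (List Int)) (n : Nat) : Prop :=
  c.length = n ∧ ∀ row ∈ c, row.length = n

abbrev vmkHcov (grille : List (List Int)) (i j : Nat) : Prop :=
  ∃ r ∈ vmkRuns (vmkLrow grille i) 0 [], j ∈ r
abbrev vmkVcov (grille : List (List Int)) (i j : Nat) : Prop :=
  ∃ r ∈ vmkRuns (vmkLcol grille j) 0 [], i ∈ r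

theorem vmk_foldl_range_getD_aux {σ : Type} (f : σ → Nat → Int → σ) (d : Int) :
    ∀ (xs pre : List Int) (init : σ),
    (List.range' pre.length xs.length).foldl (fun s j => f s j ((pre ++ xs).getD j d)) init
      = (xs.zipIdx pre.length).foldl (fun s p => f s p.2 p.1) init := by
  intro xs
  induction xs with
  | nil => simp
  | cons a t ih =>
    intro pre init
    rw [List.length_cons, List.range'_succ, List.foldl_cons, List.zipIdx_cons, List.foldl_cons]
    have hget : (pre ++ a :: t).getD pre.length d = a := by
      rw [List.getD_eq_getElem?_getD, List.getElem?_append_right (le_refl _)]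
      simp
    rw [hget]
    have := ih (pre ++ [a]) (f init pre.length a)
    simp only [List.length_append, List.length_cons, List.length_nil, List.append_assoc,
      List.cons_append, List.nil_append] at this ⊢
    rw [this]

theorem vmk_foldl_range_getD {σ : Type} (f : σ → Nat → Int → σ) (xs : List Int) (d : Int) (init : σ) :
    (List.range xs.length).foldl (fun s j => f s j (xs.getD j d)) init
      = (xs.zipIdx).foldl (fun s p => f s p.2 p.1) init := by
  have := vmk_foldl_range_getD_aux f d xs [] init
  simpa [List.range_eq_range'] using this

theorem vmk_machine (cm : Nat → Nat × Nat) (ℓ : List Int) (k : Nat)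
    (gs : List (List (Nat × Nat))) (g : List Nat) :
    (let st := (ℓ.zipIdx k).foldl
        (fun (st : List (List (Nat × Nat)) × List (Nat × Nat)) p =>
          if p.1 = 0 then (st.1, st.2 ++ [cm p.2])
          else (if 2 ≤ st.2.length then st.1 ++ [st.2] else st.1, []))
        (gs, g.map cm);
      if 2 ≤ st.2.length then st.1 ++ [st.2] else st.1)
      = gs ++ (vmkRuns ℓ k g).map (fun r => r.map cm) := by
  induction ℓ generalizing k gs g with
  | nil =>
    simp only [List.zipIdx_nil, List.foldl_nil, vmkRuns, List.length_map]
    split <;> simp_all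
  | cons v t ih =>
    simp only [List.zipIdx_cons, List.foldl_cons, vmkRuns]
    by_cases hv : v = 0
    · simp only [hv]
      have : (g.map cm) ++ [cm k] = (g ++ [k]).map cm := by simp
      rw [this]
      exact ih (k + 1) gs (g ++ [k])
    · simp only [if_neg hv, List.length_map]
      have := ih (k + 1) (if 2 ≤ g.length then gs ++ [g.map cm] else gs) []
      simp only [List.map_nil] at this
      rw [this]
      split <;> simp

theorem vmkRuns_two_le (ℓ : List Int) (k : Nat) (g : List Nat) :
    ∀ r ∈ vmkRuns ℓ k g, 2 ≤ r.length := by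
  induction ℓ generalizing k g with
  | nil => intro r hr; simp only [vmkRuns] at hr; split at hr <;> simp_all
  | cons v t ih =>
    intro r hr; simp only [vmkRuns] at hr
    split at hr
    · exact ih _ _ r hr
    · rcases List.mem_append.1 hr with h | h
      · split at h <;> simp_all
      · exact ih _ _ r h

theorem vmkRuns_mem_bound (ℓ : List Int) (k : Nat) (g : List Nat) :
    ∀ r ∈ vmkRuns ℓ k g, ∀ p ∈ r, p ∈ g ∨ (k ≤ p ∧ p < k + ℓ.length) := by
  induction ℓ generalizing k g with
  | nil => intro r hr p hp; simp only [vmkRuns] at hr; split at hr <;> simp_all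
  | cons v t ih =>
    intro r hr p hp
    simp only [vmkRuns] at hr
    split at hr
    · rcases ih _ _ r hr p hp with h | h
      · rcases List.mem_append.1 h with h | h
        · exact Or.inl h
        · right; simp only [List.length_cons]; simp at h; omega
      · right; simp only [List.length_cons]; omega
    · rcases List.mem_append.1 hr with h | h
      · split at h <;> simp_all
      · rcases ih _ _ r h p hp with h | h
        · simp at h
        · right; constructor <;> [omega; (simp; omega)]

theorem vmkRuns_flatten_nodup (ℓ : List Int) (k : Nat) (g : List Nat)
    (hnd : g.Nodup) (hlt : ∀ p ∈ g, p < k) :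
    ((vmkRuns ℓ k g).flatten).Nodup := by
  induction ℓ generalizing k g with
  | nil =>
    simp only [vmkRuns]; split <;> simp_all
  | cons v t ih =>
    simp only [vmkRuns]
    split
    · apply ih
      · refine List.Nodup.append hnd (by simp) ?_
        intro a ha hb
        simp at hb
        exact absurd (hlt a ha) (by omega)
      · intro p hp
        rcases List.mem_append.1 hp with h | h
        · exact Nat.lt_succ_of_lt (hlt p h)
        · simp at h; omega
    · rw [List.flatten_append]
      apply List.Nodup.append
      · split <;> simp_all
      · exact ih _ _ List.nodup_nil (by simp)
      · intro a ha hb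
        have h1 : a ∈ g := by split at ha <;> simp_all
        have h2 := List.mem_flatten.1 hb
        rcases h2 with ⟨r, hr, har⟩
        rcases vmkRuns_mem_bound _ _ _ r hr a har with h | h
        · simp at h
        · have := hlt a h1; omega

theorem vmkRuns_block (ℓ : List Int) (k : Nat) (g : List Nat) (hlt : ∀ p ∈ g, p < k) :
    ∀ r ∈ vmkRuns ℓ k g, (∀ p ∈ g, p ∈ r) ∨ (∀ p ∈ g, p ∉ r) := by
  induction ℓ generalizing k g with
  | nil =>
    intro r hr
    simp only [vmkRuns] at hr
    split at hr <;> simp_all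
  | cons v t ih =>
    intro r hr
    simp only [vmkRuns] at hr
    split at hr
    · have hlt' : ∀ p ∈ g ++ [k], p < k + 1 := by
        intro p hp
        rcases List.mem_append.1 hp with h | h
        · exact Nat.lt_succ_of_lt (hlt p h)
        · simp at h; omega
      rcases ih (k + 1) (g ++ [k]) hlt' r hr with h | h
      · left; intro p hp; exact h p (List.mem_append.2 (Or.inl hp))
      · right; intro p hp; exact h p (List.mem_append.2 (Or.inl hp))
    · rcases List.mem_append.1 hr with h | h
      · split at h <;> simp_all
      · right; intro p hp hpr
        rcases vmkRuns_mem_bound _ _ _ r h p hpr with h2 | h2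
        · simp at h2
        · exact absurd (hlt p hp) (by omega)

theorem vmkLigneOk_iff (ℓ : List Int) (k : Nat) (g : List Nat) (hlt : ∀ p ∈ g, p < k) :
    vmkLigneOk g.length ℓ = true ↔
      ((∀ r ∈ vmkRuns ℓ k g, r.length ≤ 9) ∧
       (∀ d, (hd : d < ℓ.length) → ℓ[d] = 0 → ∃ r ∈ vmkRuns ℓ k g, k + d ∈ r) ∧
       (g = [] ∨ ∃ r ∈ vmkRuns ℓ k g, ∀ p ∈ g, p ∈ r)) := by
  induction ℓ generalizing k g with
  | nil =>
    simp only [vmkLigneOk, vmkRuns, List.length_nil]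
    by_cases h2 : 2 ≤ g.length
    · rw [if_pos h2]
      constructor
      · intro h
        simp only [Bool.and_eq_true, Bool.not_eq_eq_eq_not, Bool.not_true, beq_eq_false_iff_ne,
          decide_eq_true_eq] at h
        refine ⟨?_, by intro d hd; simp at hd, Or.inr ⟨g, by simp, fun p hp => hp⟩⟩
        intro r hr; simp at hr; subst hr; omega
      · intro ⟨ha, _, _⟩
        have := ha g (by simp)
        simp; omega
    · rw [if_neg h2]
      constructor
      · intro h
        simp only [Bool.and_eq_true, Bool.not_eq_eq_eq_not, Bool.not_true, beq_eq_false_iff_ne,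
          decide_eq_true_eq] at h
        refine ⟨by simp, by intro d hd; simp at hd, Or.inl ?_⟩
        rcases g with _ | ⟨a, g'⟩
        · rfl
        · exfalso; simp only [List.length_cons] at h h2 ⊢; omega
      · intro ⟨_, _, h3⟩
        rcases h3 with h3 | ⟨r, hr, _⟩
        · subst h3; simp
        · simp at hr
  | cons v t ih =>
    by_cases hv : v = 0
    · -- zero cell: extend the run
      have hlt' : ∀ p ∈ g ++ [k], p < k + 1 := by
        intro p hp; rcases List.mem_append.1 hp with h | h
        · exact Nat.lt_succ_of_lt (hlt p h)
        · simp at h; omega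
      have hih := ih (k + 1) (g ++ [k]) hlt'
      have hlen : (g ++ [k]).length = g.length + 1 := by simp
      rw [show vmkLigneOk g.length (v :: t) = vmkLigneOk (g ++ [k]).length t by
            simp [vmkLigneOk, hv, hlen]]
      rw [show vmkRuns (v :: t) k g = vmkRuns t (k + 1) (g ++ [k]) by simp [vmkRuns, hv]]
      rw [hih]
      constructor
      · intro ⟨h1, h2, h3⟩
        refine ⟨h1, ?_, ?_⟩
        · intro d hd hz
          match d with
          | 0 =>
            rcases h3 with h3 | ⟨r, hr, hgr⟩
            · simp at h3
            · exact ⟨r, hr, by simpa using hgr k (by simp)⟩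
          | Nat.succ d' =>
            simp only [List.getElem_cons_succ] at hz
            have := h2 d' (by simpa using hd) hz
            rcases this with ⟨r, hr, hmem⟩
            exact ⟨r, hr, by rw [show k + (d' + 1) = k + 1 + d' by omega]; exact hmem⟩
        · rcases h3 with h3 | ⟨r, hr, hgr⟩
          · simp at h3
          · rcases g with _ | _
            · left; rfl
            · right; exact ⟨r, hr, fun p hp => hgr p (List.mem_append.2 (Or.inl hp))⟩
      · intro ⟨h1, h2, _⟩
        refine ⟨h1, ?_, ?_⟩
        · intro d hd hz
          have := h2 (d + 1) (by simpa using hd) (by simpa using hz)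
          rcases this with ⟨r, hr, hmem⟩
          refine ⟨r, hr, ?_⟩
          have : k + 1 + d = k + (d + 1) := by omega
          rw [this]; exact hmem
        · -- the run containing k contains all of g ++ [k]
          have hk : ∃ r ∈ vmkRuns t (k + 1) (g ++ [k]), k ∈ r := by
            have := h2 0 (by simp) (by simpa using hv)
            simpa using this
        
          rcases hk with ⟨r, hr, hkr⟩
          rcases vmkRuns_block t (k + 1) (g ++ [k]) hlt' r hr with hb | hb
          · right; exact ⟨r, hr, hb⟩
          · exact absurd hkr (hb k (by simp))
    · -- nonzero cell: flush
      simp only [vmkLigneOk, vmkRuns, if_neg hv]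
      by_cases h1 : g.length = 1
      · rw [if_pos (by simp [h1])]
        constructor
        · intro h; exact absurd h (by simp)
        · intro ⟨_, _, h3⟩
          rcases h3 with h3 | ⟨r, hr, hgr⟩
          · exfalso; subst h3; simp at h1
          · exfalso
            rcases g with _ | ⟨a, g'⟩
            · simp at h1
            · have ha : a ∈ r := hgr a (by simp)
              rw [if_neg (by simp only [List.length_cons] at h1 ⊢; omega)] at hr
              simp only [List.nil_append] at hr
              rcases vmkRuns_mem_bound _ _ _ r hr a ha with h | h
              · simp at h
              · have := hlt a (by simp); omega
      · by_cases h9 : 9 < g.length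
        · rw [if_pos (by simp; omega)]
          constructor
          · intro h; exact absurd h (by simp)
          · intro ⟨hs, _, _⟩
            exfalso
            have hg : g ∈ vmkRuns (v :: t) k g := by
              simp only [vmkRuns, if_neg hv]
              rw [if_pos (by omega)]
              simp
            have := hs g (by simpa only [vmkRuns, if_neg hv] using hg)
            omega
        · rw [if_neg (by simp; omega)]
          have hih := ih (k + 1) ([] : List Nat) (by simp)
          simp only [List.length_nil] at hih
          rw [hih]
          by_cases h0 : g.length = 0
          · have hg0 : g = [] := List.length_eq_zero_iff.1 h0
            subst hg0
            simp only [List.length_nil]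
            rw [if_neg (by omega)]
            simp only [List.nil_append]
            constructor
            · intro ⟨ha, hb, _⟩
              refine ⟨ha, ?_, (by left; trivial)⟩
              intro d hd hz
              match d with
              | 0 => exact absurd (by simpa using hz) hv
              | Nat.succ d' =>
                have := hb d' (by simpa using hd) (by simpa using hz)
                rcases this with ⟨r, hr, hm⟩
                exact ⟨r, hr, by rw [show k + (d' + 1) = k + 1 + d' by omega]; exact hm⟩
            · intro ⟨ha, hb, _⟩
              refine ⟨ha, ?_, (by left; trivial)⟩
              intro d hd hz
              have := hb (d + 1) (by simpa using hd) (by simpa using hz)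
              rcases this with ⟨r, hr, hm⟩
              exact ⟨r, hr, by rw [show k + 1 + d = k + (d + 1) by omega]; exact hm⟩
          · -- 2 ≤ len ≤ 9 : run flushed
            have h2le : 2 ≤ g.length := by omega
            rw [if_pos h2le]
            constructor
            · intro ⟨ha, hb, _⟩
              refine ⟨?_, ?_, Or.inr ⟨g, by simp, fun p hp => hp⟩⟩
              · intro r hr
                rcases List.mem_cons.1 hr with h | h
                · subst h; omega
                · exact ha r h
              · intro d hd hz
                match d with
                | 0 => exact absurd (by simpa using hz) hv
                | Nat.succ d' =>
                  have := hb d' (by simpa using hd) (by simpa using hz)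
                  rcases this with ⟨r, hr, hm⟩
                  exact ⟨r, by simp [hr], by rw [show k + (d' + 1) = k + 1 + d' by omega]; exact hm⟩
            · intro ⟨ha, hb, _⟩
              refine ⟨fun r hr => ha r (by simp [hr]), ?_, (by left; trivial)⟩
              intro d hd hz
              have := hb (d + 1) (by simpa using hd) (by simpa using hz)
              rcases this with ⟨r, hr, hm⟩
              rcases List.mem_cons.1 hr with h | h
              · exfalso; subst h
                have := hlt (k + (d + 1)) hm; omega
              · exact ⟨r, h, by rw [show k + 1 + d = k + (d + 1) by omega]; exact hm⟩

theorem vmk_getD_modify {α : Type} (l : List α) (i : Nat) (f : α → α) (j : Nat) (d : α) :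
    (l.modify i f).getD j d = if i = j ∧ j < l.length then f (l.getD j d) else l.getD j d := by
  rw [List.getD_eq_getElem?_getD, List.getElem?_modify]
  by_cases hj : j < l.length
  · rw [List.getElem?_eq_getElem hj]
    by_cases hij : i = j
    · simp [hij, hj, List.getD_eq_getElem?_getD]
    · simp [hij, hj, List.getD_eq_getElem?_getD]
  · rw [List.getElem?_eq_none (by omega)]
    simp [hj, List.getD_eq_getElem?_getD]

theorem vmkShape_incr (c : List (List Int)) (n : Nat) (p : Nat × Nat) (hs : vmkShape c n) :
    vmkShape (vmkIncr c p) n := by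
  obtain ⟨h1, h2⟩ := hs
  refine ⟨by simp [vmkIncr, h1], ?_⟩
  intro row hrow
  rcases (List.mem_iff_getElem).1 hrow with ⟨idx, hidx, hval⟩
  simp only [vmkIncr] at hval hidx
  rw [List.length_modify] at hidx
  rw [List.getElem_modify] at hval
  split at hval
  · rw [← hval, List.length_modify]
    exact h2 _ (List.getElem_mem hidx)
  · rw [← hval]
    exact h2 _ (List.getElem_mem hidx)

theorem vmkLook_incr (c : List (List Int)) (n : Nat) (a b i j : Nat) (hs : vmkShape c n)
    (ha : a < n) (hb : b < n) :
    vmkLook (vmkIncr c (a, b)) i j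
      = vmkLook c i j + (if a = i ∧ b = j then 1 else 0) := by
  obtain ⟨h1, h2⟩ := hs
  unfold vmkLook vmkIncr
  rw [vmk_getD_modify]
  by_cases hcase : a = i ∧ i < c.length
  · obtain ⟨hai, hi⟩ := hcase
    rw [if_pos ⟨hai, hi⟩]
    have hrowlen : (c.getD i []).length = n := by
      rw [List.getD_eq_getElem?_getD, List.getElem?_eq_getElem hi]
      exact h2 _ (List.getElem_mem hi)
    rw [vmk_getD_modify]
    by_cases hbj : b = j
    · rw [if_pos ⟨hbj, by rw [hrowlen]; omega⟩, if_pos ⟨hai, hbj⟩]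
    · rw [if_neg (by tauto), if_neg (by tauto)]
      simp
  · rw [if_neg hcase]
    have hne : ¬(a = i ∧ b = j) := by
      intro ⟨x, _⟩
      exact hcase ⟨x, by omega⟩
    rw [if_neg hne]
    simp

theorem vmkLook_foldl_coords (n : Nat) (g : List (Nat × Nat)) (c : List (List Int)) (i j : Nat)
    (hs : vmkShape c n) (hg : ∀ p ∈ g, p.1 < n ∧ p.2 < n) :
    vmkShape (g.foldl vmkIncr c) n ∧
    vmkLook (g.foldl vmkIncr c) i j
      = vmkLook c i j + (g.countP (fun p => p == (i, j)) : Int) := by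
  induction g generalizing c with
  | nil => simpa using hs
  | cons p t ih =>
    have hp := hg p (by simp)
    have hs' := vmkShape_incr c n p hs
    have := ih (vmkIncr c p) hs' (fun q hq => hg q (by simp [hq]))
    obtain ⟨ha, hb⟩ := this
    refine ⟨by simpa using ha, ?_⟩
    simp only [List.foldl_cons, List.countP_cons]
    rw [hb]
    have : vmkIncr c p = vmkIncr c (p.1, p.2) := by rfl
    rw [this, vmkLook_incr c n p.1 p.2 i j hs hp.1 hp.2]
    by_cases hpe : p = (i, j)
    · subst hpe; simp
      push_cast
      ring
    · have h1 : ¬(p.1 = i ∧ p.2 = j) := by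
        intro ⟨x, y⟩; exact hpe (Prod.ext x y)
      have h2 : (p == (i, j)) = false := by
        simp [hpe]
      simp [h1, h2]

theorem vmkLook_foldl_groups (n : Nat) (G : List (List (Nat × Nat))) (c : List (List Int)) (i j : Nat)
    (hs : vmkShape c n) (hG : ∀ g ∈ G, ∀ p ∈ g, p.1 < n ∧ p.2 < n) :
    vmkLook (G.foldl (fun c g => g.foldl vmkIncr c) c) i j
      = vmkLook c i j + ((G.map (fun g => (g.countP (fun p => p == (i, j)) : Int))).sum) := by
  induction G generalizing c with
  | nil => simp
  | cons g T ih =>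
    have h1 := vmkLook_foldl_coords n g c i j hs (hG g (by simp))
    simp only [List.foldl_cons, List.map_cons, List.sum_cons]
    rw [ih _ h1.1 (fun g' hg' => hG g' (by simp [hg'])), h1.2]
    ring

theorem vmkLook_replicate (n : Nat) (i j : Nat) :
    vmkLook (List.replicate n (List.replicate n (0 : Int))) i j = 0 := by
  unfold vmkLook
  rcases Nat.lt_or_ge i n with hi | hi
  · rw [show (List.replicate n (List.replicate n (0:Int))).getD i [] = List.replicate n (0:Int) from by
        rw [List.getD_eq_getElem?_getD, List.getElem?_replicate, if_pos hi]; rfl]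
    rcases Nat.lt_or_ge j n with hj | hj
    · rw [List.getD_eq_getElem?_getD, List.getElem?_replicate, if_pos hj]; rfl
    · rw [List.getD_eq_getElem?_getD, List.getElem?_replicate, if_neg (by omega)]; rfl
  · rw [show (List.replicate n (List.replicate n (0:Int))).getD i [] = [] from by
        rw [List.getD_eq_getElem?_getD, List.getElem?_replicate, if_neg (by omega)]; rfl]
    rfl

theorem vmk_sum_count_cast (j : Nat) (rs : List (List Nat)) :
    (rs.map (fun r => (r.count j : Int))).sum = ((rs.map (List.count j)).sum : Nat) := by
  induction rs with
  | nil => simp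
  | cons a t ihh => simp only [List.map_cons, List.sum_cons, ihh]; push_cast [List.count]; ring

theorem vmk_sum_count (j : Nat) (rs : List (List Nat)) (hnd : rs.flatten.Nodup) :
    ((rs.map (fun r => (r.count j : Int))).sum)
      = if (∃ r ∈ rs, j ∈ r) then 1 else 0 := by
  have h1 : (rs.map (List.count j)).sum = rs.flatten.count j := (List.count_flatten).symm
  have h2 : rs.flatten.count j ≤ 1 := List.nodup_iff_count_le_one.1 hnd j
  by_cases hm : ∃ r ∈ rs, j ∈ r
  · have hmem : j ∈ rs.flatten := List.mem_flatten.2 (by rcases hm with ⟨r, h, hj⟩; exact ⟨r, h, hj⟩)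
    have h3 : 1 ≤ rs.flatten.count j := List.count_pos_iff.2 hmem
    have h4 : rs.flatten.count j = 1 := by omega
    rw [if_pos hm, vmk_sum_count_cast, h1, h4]; rfl
  · have hmem : j ∉ rs.flatten := by
      intro h; exact hm (by rcases List.mem_flatten.1 h with ⟨r, hr, hj⟩; exact ⟨r, hr, hj⟩)
    have h4 : rs.flatten.count j = 0 := List.count_eq_zero.2 hmem
    rw [if_neg hm, vmk_sum_count_cast, h1, h4]; rfl

theorem vmk_line_fold (look : Nat → Int) (xs : List Int) (n : Nat) (cm : Nat → Nat × Nat)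
    (gs : List (List (Nat × Nat)))
    (hxs : xs.length = n) (hagree : ∀ c, c < n → look c = xs.getD c 1) :
    (let st := (List.range n).foldl
        (fun (st : List (List (Nat × Nat)) × List (Nat × Nat)) c =>
          if look c = 0 then (st.1, st.2 ++ [cm c])
          else (if 2 ≤ st.2.length then st.1 ++ [st.2] else st.1, []))
        (gs, []);
      if 2 ≤ st.2.length then st.1 ++ [st.2] else st.1)
      = gs ++ (vmkRuns xs 0 []).map (fun r => r.map cm) := by
  have h1 : (List.range n).foldl
        (fun (st : List (List (Nat × Nat)) × List (Nat × Nat)) c =>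
          if look c = 0 then (st.1, st.2 ++ [cm c])
          else (if 2 ≤ st.2.length then st.1 ++ [st.2] else st.1, []))
        (gs, [])
      = (List.range n).foldl
        (fun (st : List (List (Nat × Nat)) × List (Nat × Nat)) c =>
          if xs.getD c 1 = 0 then (st.1, st.2 ++ [cm c])
          else (if 2 ≤ st.2.length then st.1 ++ [st.2] else st.1, []))
        (gs, []) := by
    apply PySem.List.foldl_congr_mem
    intro acc c hc
    rw [hagree c (by simpa using hc)]
  subst hxs
  rw [h1]
  have h2 := vmk_foldl_range_getD
      (f := fun (st : List (List (Nat × Nat)) × List (Nat × Nat)) c v =>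
        if v = 0 then (st.1, st.2 ++ [cm c])
        else (if 2 ≤ st.2.length then st.1 ++ [st.2] else st.1, []))
      xs 1 (gs, [])
  rw [h2]
  have h3 := vmk_machine cm xs 0 gs []
  simpa using h3


def vmkF_h (grille : List (List Int)) (i : Nat) : List (List (Nat × Nat)) :=
  (vmkRuns (vmkLrow grille i) 0 []).map (fun r => r.map (fun j => (i, j)))
def vmkF_v (grille : List (List Int)) (j : Nat) : List (List (Nat × Nat)) :=
  (vmkRuns (vmkLcol grille j) 0 []).map (fun r => r.map (fun i => (i, j)))

theorem vmkLrow_length (grille : List (List Int)) (i : Nat)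
    (hpre : Pre_valider_masque_kakuro grille) (hi : i < grille.length) :
    (vmkLrow grille i).length = grille.length := by
  have hmem : grille.getD i [] ∈ grille := by
    rw [List.getD_eq_getElem?_getD, List.getElem?_eq_getElem hi]
    exact List.getElem_mem hi
  have := hpre _ hmem
  unfold vmkLrow
  rw [List.length_take]
  omega

theorem vmkLcol_length (grille : List (List Int)) (j : Nat) :
    (vmkLcol grille j).length = grille.length := by simp [vmkLcol]

theorem vmkLrow_getD (grille : List (List Int)) (i c : Nat)
    (hpre : Pre_valider_masque_kakuro grille) (hi : i < grille.length)
    (hc : c < grille.length) :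
    (grille.getD i []).getD c 1 = (vmkLrow grille i).getD c 1 := by
  unfold vmkLrow
  rw [List.getD_eq_getElem?_getD, List.getD_eq_getElem?_getD, List.getD_eq_getElem?_getD,
    List.getElem?_take, if_pos hc]

theorem vmkLcol_getD (grille : List (List Int)) (j c : Nat) (hc : c < grille.length) :
    (grille.getD c []).getD j 1 = (vmkLcol grille j).getD c 1 := by
  unfold vmkLcol
  rw [PySem.List.getD_map_range _ _ _ _ hc]

theorem vmk_gh_eq (grille : List (List Int)) (hpre : Pre_valider_masque_kakuro grille) :
    trouver_groupes_horizontaux_kakuro grille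
      = (List.range grille.length).flatMap (vmkF_h grille) := by
  have hstep : ∀ (acc : List (List (Nat × Nat))) (ligne : Nat), ligne ∈ List.range grille.length →
      (let st := (List.range grille.length).foldl
          (fun (st : List (List (Nat × Nat)) × List (Nat × Nat)) colonne =>
            if (grille.getD ligne []).getD colonne 1 = 0 then (st.1, st.2 ++ [(ligne, colonne)])
            else (if 2 ≤ st.2.length then st.1 ++ [st.2] else st.1, []))
          (acc, []);
        if 2 ≤ st.2.length then st.1 ++ [st.2] else st.1)
      = acc ++ vmkF_h grille ligne := by
    intro acc ligne hl
    have hl' : ligne < grille.length := by simpa using hl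
    exact vmk_line_fold (fun c => (grille.getD ligne []).getD c 1) (vmkLrow grille ligne)
      grille.length (fun c => (ligne, c)) acc (vmkLrow_length grille ligne hpre hl')
      (fun c hc => vmkLrow_getD grille ligne c hpre hl' hc)
  exact (PySem.List.foldl_congr_mem (List.range grille.length)
      (fun (groupes : List (List (Nat × Nat))) ligne =>
        let st := (List.range grille.length).foldl
          (fun (st : List (List (Nat × Nat)) × List (Nat × Nat)) colonne =>
            if (grille.getD ligne []).getD colonne 1 = 0 then (st.1, st.2 ++ [(ligne, colonne)])
            else (if 2 ≤ st.2.length then st.1 ++ [st.2] else st.1, []))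
          (groupes, []);
        if 2 ≤ st.2.length then st.1 ++ [st.2] else st.1)
      (fun acc ligne => acc ++ vmkF_h grille ligne) [] hstep).trans
    (PySem.List.foldl_append_eq_flatMap _ _ _)

theorem vmk_gv_eq (grille : List (List Int)) :
    trouver_groupes_verticaux_kakuro grille
      = (List.range grille.length).flatMap (vmkF_v grille) := by
  have hstep : ∀ (acc : List (List (Nat × Nat))) (colonne : Nat), colonne ∈ List.range grille.length →
      (let st := (List.range grille.length).foldl
          (fun (st : List (List (Nat × Nat)) × List (Nat × Nat)) ligne =>
            if (grille.getD ligne []).getD colonne 1 = 0 then (st.1, st.2 ++ [(ligne, colonne)])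
            else (if 2 ≤ st.2.length then st.1 ++ [st.2] else st.1, []))
          (acc, []);
        if 2 ≤ st.2.length then st.1 ++ [st.2] else st.1)
      = acc ++ vmkF_v grille colonne := by
    intro acc colonne _
    exact vmk_line_fold (fun c => (grille.getD c []).getD colonne 1) (vmkLcol grille colonne)
      grille.length (fun c => (c, colonne)) acc (vmkLcol_length grille colonne)
      (fun c hc => vmkLcol_getD grille colonne c hc)
  exact (PySem.List.foldl_congr_mem (List.range grille.length)
      (fun (groupes : List (List (Nat × Nat))) colonne =>
        let st := (List.range grille.length).foldl
          (fun (st : List (List (Nat × Nat)) × List (Nat × Nat)) ligne =>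
            if (grille.getD ligne []).getD colonne 1 = 0 then (st.1, st.2 ++ [(ligne, colonne)])
            else (if 2 ≤ st.2.length then st.1 ++ [st.2] else st.1, []))
          (groupes, []);
        if 2 ≤ st.2.length then st.1 ++ [st.2] else st.1)
      (fun acc colonne => acc ++ vmkF_v grille colonne) [] hstep).trans
    (PySem.List.foldl_append_eq_flatMap _ _ _)

theorem vmk_sum_ite_range (n i : Nat) (hi : i < n) (f : Nat → Int) :
    ((List.range n).map (fun x => if x = i then f x else 0)).sum = f i := by
  induction n with
  | zero => omega
  | succ m ih =>
    rw [List.range_succ, List.map_append, List.sum_append]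
    by_cases h : i < m
    · rw [ih h]; simp; omega
    · have : i = m := by omega
      subst this
      have : ((List.range i).map (fun x => if x = i then f x else 0)).sum = 0 := by
        apply List.sum_eq_zero
        intro x hx
        simp only [List.mem_map, List.mem_range] at hx
        rcases hx with ⟨y, hy, hval⟩
        rw [if_neg (by omega)] at hval
        omega
      rw [this]; simp

theorem vmk_sum_map_flatMap {α β : Type} (f : β → Int) (F : α → List β) (l : List α) :
    (((l.flatMap F).map f).sum) = (l.map (fun x => ((F x).map f).sum)).sum := by
  induction l with
  | nil => simp
  | cons a t ih => simp [ih]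

def vmkCnt (grille : List (List Int)) : List (List Int) :=
  (trouver_groupes_horizontaux_kakuro grille ++ trouver_groupes_verticaux_kakuro grille).foldl
    (fun c g => g.foldl vmkIncr c)
    (List.replicate grille.length (List.replicate grille.length 0))

theorem vmk_coords_bound (grille : List (List Int)) (hpre : Pre_valider_masque_kakuro grille) :
    ∀ g ∈ trouver_groupes_horizontaux_kakuro grille ++ trouver_groupes_verticaux_kakuro grille,
      ∀ p ∈ g, p.1 < grille.length ∧ p.2 < grille.length := by
  intro g hg p hp
  rcases List.mem_append.1 hg with h | h
  · rw [vmk_gh_eq grille hpre] at h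
    rcases List.mem_flatMap.1 h with ⟨i', hi', hgF⟩
    rcases List.mem_map.1 hgF with ⟨r, hr, rfl⟩
    rcases List.mem_map.1 hp with ⟨c, hc, rfl⟩
    have hb := vmkRuns_mem_bound _ _ _ r hr c hc
    have hlen := vmkLrow_length grille i' hpre (by simpa using hi')
    have hi'' : i' < grille.length := by simpa using hi'
    simp only [List.not_mem_nil, false_or] at hb
    exact ⟨hi'', by omega⟩
  · rw [vmk_gv_eq grille] at h
    rcases List.mem_flatMap.1 h with ⟨j', hj', hgF⟩
    rcases List.mem_map.1 hgF with ⟨r, hr, rfl⟩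
    rcases List.mem_map.1 hp with ⟨c, hc, rfl⟩
    have hb := vmkRuns_mem_bound _ _ _ r hr c hc
    have hlen := vmkLcol_length grille j'
    have hj'' : j' < grille.length := by simpa using hj'
    simp only [List.not_mem_nil, false_or] at hb
    exact ⟨by omega, hj''⟩

theorem vmk_sum_h (grille : List (List Int)) (hpre : Pre_valider_masque_kakuro grille)
    (i j : Nat) (hi : i < grille.length) :
    ((trouver_groupes_horizontaux_kakuro grille).map
        (fun g => (g.countP (fun p => p == (i, j)) : Int))).sum
      = if vmkHcov grille i j then 1 else 0 := by
  rw [vmk_gh_eq grille hpre, vmk_sum_map_flatMap]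
  have hper : ∀ i' ∈ List.range grille.length,
      ((vmkF_h grille i').map (fun g => (g.countP (fun p => p == (i, j)) : Int))).sum
        = if i' = i then (if vmkHcov grille i' j then 1 else 0) else 0 := by
    intro i' _
    unfold vmkF_h
    rw [List.map_map]
    by_cases hii : i' = i
    · subst hii
      rw [if_pos rfl]
      have hfun : ∀ r ∈ vmkRuns (vmkLrow grille i') 0 [],
          ((fun g => (g.countP (fun p => p == (i', j)) : Int)) ∘ fun r => r.map fun c => (i', c)) r
            = (r.count j : Int) := by
        intro r _
        simp only [Function.comp_apply, List.countP_map]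
        congr 1
        rw [List.count]
        apply List.countP_congr
        intro c _
        by_cases hcj : c = j <;> simp [hcj]
      rw [List.map_congr_left hfun]
      have hnd := vmkRuns_flatten_nodup (vmkLrow grille i') 0 [] List.nodup_nil (by simp)
      rw [vmk_sum_count j _ hnd]
    · rw [if_neg hii]
      apply List.sum_eq_zero
      intro x hx
      rcases List.mem_map.1 hx with ⟨r, _, rfl⟩
      simp only [Function.comp_apply, List.countP_map]
      have : r.countP ((fun p => p == (i, j)) ∘ fun c => (i', c)) = 0 := by
        apply List.countP_eq_zero.2
        intro c _
        simp [hii]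
      rw [this]
      rfl
  rw [List.map_congr_left hper]
  rw [vmk_sum_ite_range grille.length i hi (fun x => if vmkHcov grille x j then 1 else 0)]

theorem vmk_sum_v (grille : List (List Int)) (i j : Nat) (hj : j < grille.length) :
    ((trouver_groupes_verticaux_kakuro grille).map
        (fun g => (g.countP (fun p => p == (i, j)) : Int))).sum
      = if vmkVcov grille i j then 1 else 0 := by
  rw [vmk_gv_eq grille, vmk_sum_map_flatMap]
  have hper : ∀ j' ∈ List.range grille.length,
      ((vmkF_v grille j').map (fun g => (g.countP (fun p => p == (i, j)) : Int))).sum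
        = if j' = j then (if vmkVcov grille i j' then 1 else 0) else 0 := by
    intro j' _
    unfold vmkF_v
    rw [List.map_map]
    by_cases hjj : j' = j
    · subst hjj
      rw [if_pos rfl]
      have hfun : ∀ r ∈ vmkRuns (vmkLcol grille j') 0 [],
          ((fun g => (g.countP (fun p => p == (i, j')) : Int)) ∘ fun r => r.map fun c => (c, j')) r
            = (r.count i : Int) := by
        intro r _
        simp only [Function.comp_apply, List.countP_map]
        congr 1
        rw [List.count]
        apply List.countP_congr
        intro c _
        by_cases hci : c = i <;> simp [hci]
      rw [List.map_congr_left hfun]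
      have hnd := vmkRuns_flatten_nodup (vmkLcol grille j') 0 [] List.nodup_nil (by simp)
      rw [vmk_sum_count i _ hnd]
    · rw [if_neg hjj]
      apply List.sum_eq_zero
      intro x hx
      rcases List.mem_map.1 hx with ⟨r, _, rfl⟩
      simp only [Function.comp_apply, List.countP_map]
      have : r.countP ((fun p => p == (i, j)) ∘ fun c => (c, j')) = 0 := by
        apply List.countP_eq_zero.2
        intro c _
        simp [hjj]
      rw [this]
      rfl
  rw [List.map_congr_left hper]
  rw [vmk_sum_ite_range grille.length j hj (fun x => if vmkVcov grille i x then 1 else 0)]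

theorem vmk_cnt_eq (grille : List (List Int)) (hpre : Pre_valider_masque_kakuro grille)
    (i j : Nat) (hi : i < grille.length) (hj : j < grille.length) :
    vmkLook (vmkCnt grille) i j
      = (if vmkHcov grille i j then 1 else 0) + (if vmkVcov grille i j then 1 else 0) := by
  have hshape : vmkShape (List.replicate grille.length (List.replicate grille.length (0 : Int)))
      grille.length := by
    refine ⟨by simp, ?_⟩
    intro row hrow
    rw [List.eq_of_mem_replicate hrow]
    simp
  unfold vmkCnt
  rw [vmkLook_foldl_groups grille.length _ _ i j hshape (vmk_coords_bound grille hpre),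
    vmkLook_replicate, List.map_append, List.sum_append,
    vmk_sum_h grille hpre i j hi, vmk_sum_v grille i j hj]
  ring

theorem vmk_A_iff (grille : List (List Int)) (hpre : Pre_valider_masque_kakuro grille) :
    valider_masque_kakuro grille = true ↔
      ((∀ i < grille.length, ∀ r ∈ vmkRuns (vmkLrow grille i) 0 [], r.length ≤ 9) ∧
       (∀ j < grille.length, ∀ r ∈ vmkRuns (vmkLcol grille j) 0 [], r.length ≤ 9) ∧
       (∀ i < grille.length, ∀ j < grille.length,
          vmkCell grille i j = 0 → vmkHcov grille i j ∧ vmkVcov grille i j)) := by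
  have hAeq : valider_masque_kakuro grille =
      (if (trouver_groupes_horizontaux_kakuro grille ++ trouver_groupes_verticaux_kakuro grille).any
          (fun g => g.length < 2 || 9 < g.length) then false
       else !((List.range grille.length).any fun i => (List.range grille.length).any fun j =>
          vmkCell grille i j == 0 && !(vmkLook (vmkCnt grille) i j == 2))) := rfl
  rw [hAeq]
  have hcell : ∀ i < grille.length, ∀ j < grille.length,
      (vmkLook (vmkCnt grille) i j = 2 ↔ vmkHcov grille i j ∧ vmkVcov grille i j) := by
    intro i hi j hj
    rw [vmk_cnt_eq grille hpre i j hi hj]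
    by_cases h1 : vmkHcov grille i j <;> by_cases h2 : vmkVcov grille i j <;>
      simp [h1, h2]
  by_cases hbad : (trouver_groupes_horizontaux_kakuro grille ++
      trouver_groupes_verticaux_kakuro grille).any (fun g => g.length < 2 || 9 < g.length) = true
  · rw [if_pos hbad]
    simp only [Bool.false_eq_true, false_iff]
    intro ⟨hs1, hs2, _⟩
    rcases List.any_eq_true.1 hbad with ⟨g, hg, hbadg⟩
    simp only [Bool.or_eq_true, decide_eq_true_eq] at hbadg
    rcases List.mem_append.1 hg with h | h
    · rw [vmk_gh_eq grille hpre] at h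
      rcases List.mem_flatMap.1 h with ⟨i', hi', hf⟩
      rcases List.mem_map.1 hf with ⟨r, hr, rfl⟩
      have h2le := vmkRuns_two_le _ _ _ r hr
      have h9 := hs1 i' (by simpa using hi') r hr
      simp only [List.length_map] at hbadg
      omega
    · rw [vmk_gv_eq grille] at h
      rcases List.mem_flatMap.1 h with ⟨j', hj', hf⟩
      rcases List.mem_map.1 hf with ⟨r, hr, rfl⟩
      have h2le := vmkRuns_two_le _ _ _ r hr
      have h9 := hs2 j' (by simpa using hj') r hr
      simp only [List.length_map] at hbadg
      omega
  · rw [if_neg hbad]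
    have hsz : ∀ g ∈ trouver_groupes_horizontaux_kakuro grille ++
        trouver_groupes_verticaux_kakuro grille, g.length ≤ 9 := by
      intro g hg
      by_contra h9
      exact hbad (List.any_eq_true.2 ⟨g, hg, by simp; omega⟩)
    have hs1 : ∀ i < grille.length, ∀ r ∈ vmkRuns (vmkLrow grille i) 0 [], r.length ≤ 9 := by
      intro i hi r hr
      have hmem : r.map (fun c => (i, c)) ∈ trouver_groupes_horizontaux_kakuro grille := by
        rw [vmk_gh_eq grille hpre]
        exact List.mem_flatMap.2 ⟨i, by simpa using hi, List.mem_map.2 ⟨r, hr, rfl⟩⟩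
      have := hsz _ (List.mem_append.2 (Or.inl hmem))
      simpa using this
    have hs2 : ∀ j < grille.length, ∀ r ∈ vmkRuns (vmkLcol grille j) 0 [], r.length ≤ 9 := by
      intro j hj r hr
      have hmem : r.map (fun c => (c, j)) ∈ trouver_groupes_verticaux_kakuro grille := by
        rw [vmk_gv_eq grille]
        exact List.mem_flatMap.2 ⟨j, by simpa using hj, List.mem_map.2 ⟨r, hr, rfl⟩⟩
      have := hsz _ (List.mem_append.2 (Or.inr hmem))
      simpa using this
    rw [Bool.not_eq_true']
    rw [List.any_eq_false]
    simp only [List.mem_range]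
    constructor
    · intro hb
      refine ⟨hs1, hs2, ?_⟩
      intro i hi j hj hz
      have h := hb i hi
      rw [List.any_eq_true] at h
      push Not at h
      have hnj := h j (by simpa using hj)
      have hcc : (vmkCell grille i j == 0) = true := by simp [hz]
      have hnot : ¬ (!(vmkLook (vmkCnt grille) i j == 2)) = true := by
        intro hq
        exact hnj (by rw [Bool.and_eq_true]; exact ⟨hcc, hq⟩)
      have hlook : vmkLook (vmkCnt grille) i j = 2 := by
        by_contra hne
        exact hnot (by simp [hne])
      exact (hcell i hi j hj).1 hlook
    · intro ⟨_, _, h3⟩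
      intro i hi
      intro hq
      rcases List.any_eq_true.1 hq with ⟨j, hjm, hpj⟩
      rw [Bool.and_eq_true] at hpj
      have hz : vmkCell grille i j = 0 := by simpa using hpj.1
      have hne : vmkLook (vmkCnt grille) i j ≠ 2 := by simpa using hpj.2
      have hj' : j < grille.length := by simpa using hjm
      exact hne ((hcell i hi j hj').2 (h3 i hi j hj' hz))

theorem vmkLrow_getElem (grille : List (List Int)) (i : Nat)
    (hpre : Pre_valider_masque_kakuro grille) (hi : i < grille.length) (d : Nat)
    (hd : d < (vmkLrow grille i).length) :
    (vmkLrow grille i)[d] = vmkCell grille i d := by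
  have hlen := vmkLrow_length grille i hpre hi
  have h1 : (vmkLrow grille i).getD d 1 = (vmkLrow grille i)[d] := List.getD_eq_getElem _ _ hd
  rw [← h1, ← vmkLrow_getD grille i d hpre hi (by omega)]
  rfl

theorem vmkLcol_getElem (grille : List (List Int)) (j d : Nat)
    (hd : d < (vmkLcol grille j).length) :
    (vmkLcol grille j)[d] = vmkCell grille d j := by
  have hlen := vmkLcol_length grille j
  have h1 : (vmkLcol grille j).getD d 1 = (vmkLcol grille j)[d] := List.getD_eq_getElem _ _ hd
  rw [← h1, ← vmkLcol_getD grille j d (by omega)]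
  rfl

theorem vmk_B_iff (grille : List (List Int)) (hpre : Pre_valider_masque_kakuro grille) :
    valider_masque_kakuro_alt grille = true ↔
      ((∀ i < grille.length,
          (∀ r ∈ vmkRuns (vmkLrow grille i) 0 [], r.length ≤ 9) ∧
          (∀ j < grille.length, vmkCell grille i j = 0 → vmkHcov grille i j)) ∧
       (∀ j < grille.length,
          (∀ r ∈ vmkRuns (vmkLcol grille j) 0 [], r.length ≤ 9) ∧
          (∀ i < grille.length, vmkCell grille i j = 0 → vmkVcov grille i j))) := by
  have hrow : ∀ i, i < grille.length → (vmkLigneOk 0 (vmkLrow grille i) = true ↔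
      ((∀ r ∈ vmkRuns (vmkLrow grille i) 0 [], r.length ≤ 9) ∧
       (∀ j < grille.length, vmkCell grille i j = 0 → vmkHcov grille i j))) := by
    intro i hi
    have hiff := vmkLigneOk_iff (vmkLrow grille i) 0 [] (by simp)
    simp only [List.length_nil] at hiff
    rw [hiff]
    have hlen := vmkLrow_length grille i hpre hi
    constructor
    · intro ⟨h1, h2, _⟩
      refine ⟨h1, ?_⟩
      intro j hj hz
      have hd : j < (vmkLrow grille i).length := by omega
      have := h2 j hd (by rw [vmkLrow_getElem grille i hpre hi j hd]; exact hz)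
      rcases this with ⟨r, hr, hm⟩
      exact ⟨r, hr, by simpa using hm⟩
    · intro ⟨h1, h2⟩
      refine ⟨h1, ?_, by left; trivial⟩
      intro d hd hz
      have hdn : d < grille.length := by omega
      have := h2 d hdn (by rw [← vmkLrow_getElem grille i hpre hi d hd]; exact hz)
      rcases this with ⟨r, hr, hm⟩
      exact ⟨r, hr, by simpa using hm⟩
  have hcol : ∀ j, j < grille.length → (vmkLigneOk 0 (vmkLcol grille j) = true ↔
      ((∀ r ∈ vmkRuns (vmkLcol grille j) 0 [], r.length ≤ 9) ∧
       (∀ i < grille.length, vmkCell grille i j = 0 → vmkVcov grille i j))) := by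
    intro j hj
    have hiff := vmkLigneOk_iff (vmkLcol grille j) 0 [] (by simp)
    simp only [List.length_nil] at hiff
    rw [hiff]
    have hlen := vmkLcol_length grille j
    constructor
    · intro ⟨h1, h2, _⟩
      refine ⟨h1, ?_⟩
      intro i hi hz
      have hd : i < (vmkLcol grille j).length := by omega
      have := h2 i hd (by rw [vmkLcol_getElem grille j i hd]; exact hz)
      rcases this with ⟨r, hr, hm⟩
      exact ⟨r, hr, by simpa using hm⟩
    · intro ⟨h1, h2⟩
      refine ⟨h1, ?_, by left; trivial⟩
      intro d hd hz
      have hdn : d < grille.length := by omega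
      have := h2 d hdn (by rw [← vmkLcol_getElem grille j d hd]; exact hz)
      rcases this with ⟨r, hr, hm⟩
      exact ⟨r, hr, by simpa using hm⟩
  simp only [valider_masque_kakuro_alt, Bool.and_eq_true, List.all_eq_true, List.mem_range]
  constructor
  · intro ⟨ha, hb⟩
    exact ⟨fun i hi => (hrow i hi).1 (ha i hi), fun j hj => (hcol j hj).1 (hb j hj)⟩
  · intro ⟨ha, hb⟩
    exact ⟨fun i hi => (hrow i hi).2 (ha i hi), fun j hj => (hcol j hj).2 (hb j hj)⟩

-- ===== VERDICT (by name: the statement is the Claim_ definition above) =====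
theorem valider_masque_kakuro_spec : Claim_equal_valider_masque_kakuro := by
  intro grille _ hpre
  unfold Spec_valider_masque_kakuro
  have hA := vmk_A_iff grille hpre
  have hB := vmk_B_iff grille hpre
  have : valider_masque_kakuro grille = true ↔ valider_masque_kakuro_alt grille = true := by
    rw [hA, hB]
    constructor
    · intro ⟨h1, h2, h3⟩
      exact ⟨fun i hi => ⟨h1 i hi, fun j hj hz => ((h3 i hi j hj) hz).1⟩,
             fun j hj => ⟨h2 j hj, fun i hi hz => ((h3 i hi j hj) hz).2⟩⟩
    · intro ⟨h1, h2⟩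
      exact ⟨fun i hi => (h1 i hi).1, fun j hj => (h2 j hj).1,
             fun i hi j hj hz => ⟨(h1 i hi).2 j hj hz, (h2 j hj).2 i hi hz⟩⟩
  rcases hx : valider_masque_kakuro grille with _ | _ <;>
    rcases hy : valider_masque_kakuro_alt grille with _ | _ <;> simp_all
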